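-- pv_equiv track=rewrite | github.com/gracechf/qa-gate-analysis | config.py | get_process_step
-- ===== SOURCE A (Python) =====
-- PROCESS_STEP_MAPPINGS = {
--     'LN-C': 'Final Inspection',
--     'LN-R': 'Outer Layer',
--     'LN-Q': 'Dispensing',
--     'LN-P': 'Screen Printing',
-- }
--
-- DEFAULT_PROCESS_STEP = 'Others'
--
-- def get_process_step(lot_number: str) -> str:
--     """
--     Extract process step from lot number based on configured mappings.
--
--     Args:
--         lot_number: Lot number string (e.g., 'LN-C12345')
--
--     Returns:
--         Process step name
--     """
--     if not isinstance(lot_number, str):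
--         return DEFAULT_PROCESS_STEP
--
--     lot_upper = lot_number.upper().strip()
--
--     for prefix, step in PROCESS_STEP_MAPPINGS.items():
--         if lot_upper.startswith(prefix):
--             return step
--
--     return DEFAULT_PROCESS_STEP
-- ===== SOURCE B (Python) =====
-- PROCESS_STEP_MAPPINGS = {
--     'LN-C': 'Final Inspection',
--     'LN-R': 'Outer Layer',
--     'LN-Q': 'Dispensing',
--     'LN-P': 'Screen Printing',
-- }
--
-- DEFAULT_PROCESS_STEP = 'Others'
--
--
-- def get_process_step(lot_number: str) -> str:
--     if not isinstance(lot_number, str):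
--         return DEFAULT_PROCESS_STEP
--     lot_upper = lot_number.upper().strip()
--     return PROCESS_STEP_MAPPINGS.get(lot_upper[:4], DEFAULT_PROCESS_STEP)
-- ===== Notes on version B (the rewrite author's own statement) =====
-- stated objective: idiomatic
-- what changed: Replaces the linear startswith scan over the prefix table by a single dict lookup keyed on the first four characters of the normalized lot number (all mapping keys have length 4).
import Mathlib
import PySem

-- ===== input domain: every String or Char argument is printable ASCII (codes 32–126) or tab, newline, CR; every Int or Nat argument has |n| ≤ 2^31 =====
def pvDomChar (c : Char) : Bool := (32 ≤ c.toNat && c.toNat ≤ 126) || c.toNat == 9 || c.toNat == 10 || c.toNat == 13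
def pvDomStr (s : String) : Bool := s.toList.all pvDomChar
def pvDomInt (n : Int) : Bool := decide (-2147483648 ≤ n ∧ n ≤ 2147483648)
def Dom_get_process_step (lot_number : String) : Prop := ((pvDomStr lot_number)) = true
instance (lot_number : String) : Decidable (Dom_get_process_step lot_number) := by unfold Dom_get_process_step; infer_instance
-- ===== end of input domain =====

-- B replaces A's linear scan over the prefix table by a single dict lookup keyed on the
-- first four characters (every mapping key has length 4); objective: idiomatic, not faster.

-- ===== PORT A =====
-- the module constant PROCESS_STEP_MAPPINGS (a dict literal, insertion order)
def pvMappings : PySem.Dict String String :=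
  PySem.Dict.ofList
    [("LN-C", "Final Inspection"), ("LN-R", "Outer Layer"),
     ("LN-Q", "Dispensing"), ("LN-P", "Screen Printing")]

-- A's `for prefix, step in PROCESS_STEP_MAPPINGS.items(): if lot_upper.startswith(prefix): return step`
def pvStepLoop : List (String × String) → String → String
  | [], _ => "Others"
  | (pre, step) :: rest, lotUpper =>
      if PySem.Str.startswith lotUpper pre then step else pvStepLoop rest lotUpper

-- the `isinstance(lot_number, str)` guard is vacuous under the type convention (lot_number : String)
def get_process_step (lot_number : String) : String :=
  pvStepLoop pvMappings.items (PySem.Str.strip (PySem.Str.upper lot_number))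

-- ===== PORT B =====
-- B: `return PROCESS_STEP_MAPPINGS.get(lot_upper[:4], DEFAULT_PROCESS_STEP)`
def get_process_step_alt (lot_number : String) : String :=
  PySem.Dict.getD pvMappings
    (PySem.Str.slice (PySem.Str.strip (PySem.Str.upper lot_number)) none (some 4)) "Others"

-- ===== PRECONDITION & SPEC =====
def Spec_get_process_step (lot_number : String) (out : String) : Prop := out = get_process_step_alt lot_number
instance (lot_number : String) (out : String) : Decidable (Spec_get_process_step lot_number out) := by unfold Spec_get_process_step; infer_instance

-- ===== CLAIM (what is proved, stated in full; the proofs are below) =====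
def Claim_equal_get_process_step : Prop := ∀ (lot_number : String), Dom_get_process_step lot_number → Spec_get_process_step lot_number (get_process_step lot_number)

-- ===== LEMMAS AND PROOFS =====
theorem pvMappings_items : pvMappings.items =
    [("LN-C", "Final Inspection"), ("LN-R", "Outer Layer"),
     ("LN-Q", "Dispensing"), ("LN-P", "Screen Printing")] := by decide

-- `lot_upper.startswith(pre)` for a 4-character `pre` is equality with the slice `lot_upper[:4]`
theorem startswith_eq_beq_slice (t pre : String) (hp : pre.toList.length = 4) :
    PySem.Str.startswith t pre = (pre == PySem.Str.slice t none (some 4)) := by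
  have hk : (PySem.Str.slice t none (some 4)).toList = t.toList.take 4 := by
    simp [PySem.Str.toList_slice, pysem]
  have hb : (pre == PySem.Str.slice t none (some 4))
      = (pre.toList == (PySem.Str.slice t none (some 4)).toList) := by
    rw [Bool.eq_iff_iff]; simp [String.ext_iff]
  rw [hb, hk, PySem.Str.startswith_eq, Bool.eq_iff_iff]
  simp only [PySem.Chars.startswith, beq_iff_eq]
  rw [List.isPrefixOf_iff_prefix, List.prefix_iff_eq_take, hp]

theorem pvStepLoop_eq_getD (t : String) : pvStepLoop pvMappings.items t
    = PySem.Dict.getD pvMappings (PySem.Str.slice t none (some 4)) "Others" := by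
  simp only [pvStepLoop, pvMappings_items, PySem.Dict.getD, PySem.Dict.get?, List.find?,
    startswith_eq_beq_slice t "LN-C" (by decide), startswith_eq_beq_slice t "LN-R" (by decide),
    startswith_eq_beq_slice t "LN-Q" (by decide), startswith_eq_beq_slice t "LN-P" (by decide)]
  cases ("LN-C" == PySem.Str.slice t none (some 4)) <;>
  cases ("LN-R" == PySem.Str.slice t none (some 4)) <;>
  cases ("LN-Q" == PySem.Str.slice t none (some 4)) <;>
  cases ("LN-P" == PySem.Str.slice t none (some 4)) <;>
    rfl

-- ===== VERDICT (by name: the statement is the Claim_ definition above) =====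
theorem get_process_step_spec : Claim_equal_get_process_step := by
  intro lot_number _
  unfold Spec_get_process_step get_process_step get_process_step_alt
  exact pvStepLoop_eq_getD _
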